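-- pv_equiv track=rewrite | github.com/frosetrain/bishan-dynamics | sweeper.py | gen_slot_distances
-- ===== SOURCE A (Python) =====
-- def gen_slot_distances(
--     begin: int, slot_width: int, slot_interval: int, mid_gap: int
-- ) -> list[list[int]]:
--     """Generate the list of distances where slots are positioned
--
--     Args:
--         begin (int): Begin
--         slot_width (int): Width of slot
--         slot_interval (int): Gap between slots
--         mid_gap (int): Gap between Pacific and Caribbean slots
--
--     Returns:
--         list[list[int]]: List of slot distances
--     """
--     slot_distances = []
--     for i in range(9):
--         if i < 4:
--             slot_distances.append(
--                 [
--                     begin + (i * slot_interval) + (i * slot_width),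
--                     begin + (i * slot_interval) + (i * slot_width) + slot_width,
--                 ]
--             )
--         else:
--             slot_distances.append(
--                 [
--                     begin + ((i - 1) * slot_interval) + (i * slot_width) + mid_gap,
--                     begin
--                     + ((i - 1) * slot_interval)
--                     + (i * slot_width)
--                     + mid_gap
--                     + slot_width,
--                 ]
--             )
--     return slot_distances
-- ===== SOURCE B (Python) =====
-- def gen_slot_distances(begin, slot_width, slot_interval, mid_gap):
--     """Generate the list of distances where slots are positioned."""
--     slot_distances = []
--     pos = begin
--     for i in range(9):
--         slot_distances.append([pos, pos + slot_width])
--         pos += slot_width + (mid_gap if i == 3 else slot_interval)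
--     return slot_distances
-- ===== Notes on version B (the rewrite author's own statement) =====
-- stated objective: simpler
-- what changed: Replaced A's closed-form per-index arithmetic with its i<4/i>=4 branch by a single running-position accumulator advanced by slot_width plus the appropriate gap (mid_gap after the 4th slot).
import Mathlib
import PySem

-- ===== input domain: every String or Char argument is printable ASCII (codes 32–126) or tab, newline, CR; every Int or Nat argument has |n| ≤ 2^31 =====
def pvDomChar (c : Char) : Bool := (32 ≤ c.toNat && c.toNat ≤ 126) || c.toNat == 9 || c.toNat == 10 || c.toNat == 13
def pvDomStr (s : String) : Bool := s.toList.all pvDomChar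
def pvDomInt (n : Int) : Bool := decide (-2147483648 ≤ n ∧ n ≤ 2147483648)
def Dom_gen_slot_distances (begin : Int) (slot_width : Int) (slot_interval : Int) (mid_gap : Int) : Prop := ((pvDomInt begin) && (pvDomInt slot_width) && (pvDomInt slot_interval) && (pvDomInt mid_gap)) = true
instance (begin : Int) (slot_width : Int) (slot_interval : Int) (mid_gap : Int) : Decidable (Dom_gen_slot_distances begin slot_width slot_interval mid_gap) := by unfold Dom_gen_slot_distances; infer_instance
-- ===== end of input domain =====

-- B replaces A's per-index closed-form arithmetic (with an i<4 branch) by a running-position accumulator loop; same result, simpler decomposition.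


-- ===== PORT A =====
def gen_slot_distances (begin : Int) (slot_width : Int) (slot_interval : Int) (mid_gap : Int) : List (List Int) :=
  (PySem.List.pyRange 0 9 1).foldl
    (fun slot_distances i =>
      if i < 4 then
        slot_distances ++
          [[begin + (i * slot_interval) + (i * slot_width),
            begin + (i * slot_interval) + (i * slot_width) + slot_width]]
      else
        slot_distances ++
          [[begin + ((i - 1) * slot_interval) + (i * slot_width) + mid_gap,
            begin + ((i - 1) * slot_interval) + (i * slot_width) + mid_gap + slot_width]])
    []

-- ===== PORT B =====
-- B: running-position accumulator; state = (pos, accumulated list)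
def gen_slot_distances_alt (begin : Int) (slot_width : Int) (slot_interval : Int) (mid_gap : Int) : List (List Int) :=
  ((PySem.List.pyRange 0 9 1).foldl
    (fun (s : Int × List (List Int)) i =>
      (s.1 + slot_width + (if i == 3 then mid_gap else slot_interval),
       s.2 ++ [[s.1, s.1 + slot_width]]))
    (begin, [])).2

-- ===== PRECONDITION & SPEC =====
def Spec_gen_slot_distances (begin : Int) (slot_width : Int) (slot_interval : Int) (mid_gap : Int) (out : List (List Int)) : Prop := out = gen_slot_distances_alt begin slot_width slot_interval mid_gap
instance (begin : Int) (slot_width : Int) (slot_interval : Int) (mid_gap : Int) (out : List (List Int)) : Decidable (Spec_gen_slot_distances begin slot_width slot_interval mid_gap out) := by unfold Spec_gen_slot_distances; infer_instance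

-- ===== CLAIM (what is proved, stated in full; the proofs are below) =====
def Claim_equal_gen_slot_distances : Prop := ∀ (begin : Int) (slot_width : Int) (slot_interval : Int) (mid_gap : Int), Dom_gen_slot_distances begin slot_width slot_interval mid_gap → Spec_gen_slot_distances begin slot_width slot_interval mid_gap (gen_slot_distances begin slot_width slot_interval mid_gap)

-- ===== LEMMAS AND PROOFS =====
lemma pyRange_0_9 : PySem.List.pyRange 0 9 1 = [0, 1, 2, 3, 4, 5, 6, 7, 8] := by decide

-- ===== VERDICT (by name: the statement is the Claim_ definition above) =====
theorem gen_slot_distances_spec : Claim_equal_gen_slot_distances := by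
  intro begin slot_width slot_interval mid_gap _
  unfold Spec_gen_slot_distances gen_slot_distances gen_slot_distances_alt
  rw [pyRange_0_9]
  simp only [List.foldl]
  norm_num
  and_intros <;> ring
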